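-- pv_equiv track=rewrite | github.com/morgoth1145/advent-of-code | lib/symbolic_math.py | _normalize_term
-- ===== SOURCE A (Python) =====
-- import collections
--
-- def _normalize_term(term):
--     factor, symbols = term
--     symbol_powers = collections.Counter()
--
--     for s, power in symbols:
--         symbol_powers[s] += power
--
--     return factor, tuple(sorted((s, power)
--                                 for s, power in symbol_powers.items()
--                                 if power != 0))
-- ===== SOURCE B (Python) =====
-- def _normalize_term(term):
--     factor, symbols = term
--     result = []
--     for s in sorted({s for s, _ in symbols}):
--         total = sum(p for t, p in symbols if t == s)
--         if total != 0:
--             result.append((s, total))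
--     return factor, tuple(result)
-- ===== Notes on version B (the rewrite author's own statement) =====
-- stated objective: alternative
-- what changed: B drops the Counter-then-sort-the-(symbol,power)-pairs pipeline: it sorts the distinct symbol names first and emits (symbol, sum of that symbol's powers) via a per-key scan, skipping zero totals, so the output is built already in order.
import Mathlib
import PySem

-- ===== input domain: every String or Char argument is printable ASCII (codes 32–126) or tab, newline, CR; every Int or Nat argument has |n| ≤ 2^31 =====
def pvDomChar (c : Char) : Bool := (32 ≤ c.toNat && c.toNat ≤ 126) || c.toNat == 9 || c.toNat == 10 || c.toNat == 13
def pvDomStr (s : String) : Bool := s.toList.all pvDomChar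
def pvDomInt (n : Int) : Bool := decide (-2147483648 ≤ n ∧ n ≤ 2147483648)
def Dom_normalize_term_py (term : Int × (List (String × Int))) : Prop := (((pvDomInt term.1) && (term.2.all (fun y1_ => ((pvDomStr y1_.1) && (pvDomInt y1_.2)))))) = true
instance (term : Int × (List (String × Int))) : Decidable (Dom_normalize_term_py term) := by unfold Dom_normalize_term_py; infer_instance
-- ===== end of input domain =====

-- B replaces A's Counter-then-sort-pairs decomposition by iterating over the sorted distinct
-- symbols and summing each symbol's powers with a per-key scan (objective: alternative).

-- ===== PORT A =====
-- for s, power in symbols: symbol_powers[s] += power   (Counter: missing key reads 0)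
-- return factor, tuple(sorted((s, power) for s, power in symbol_powers.items() if power != 0))
def normalize_term_py (term : Int × (List (String × Int))) : Int × (List (String × Int)) :=
  let factor := term.1
  let symbols := term.2
  let symbol_powers : PySem.Dict String Int :=
    symbols.foldl (fun d p => d.modify p.1 0 (· + p.2)) PySem.Dict.empty
  (factor,
   PySem.List.sorted2 (symbol_powers.items.filter (fun p => decide (p.2 ≠ 0)))
     (fun p => p.1) (fun p => p.2))

-- ===== PORT B =====
-- for s in sorted({s for s, _ in symbols}): total = sum(...); if total != 0: append (s, total)
def normalize_term_py_alt (term : Int × (List (String × Int))) : Int × (List (String × Int)) :=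
  let factor := term.1
  let symbols := term.2
  let keys := PySem.List.sorted (PySem.Set.ofList (symbols.map (fun p => p.1))) (fun s => s)
  let result := keys.foldl (fun acc s =>
      let total := ((symbols.filter (fun p => p.1 == s)).map (fun p => p.2)).sum
      if total ≠ 0 then acc ++ [(s, total)] else acc) []
  (factor, result)

-- ===== PRECONDITION & SPEC =====
def Spec_normalize_term_py (term : Int × (List (String × Int))) (out : Int × (List (String × Int))) : Prop := out = normalize_term_py_alt term
instance (term : Int × (List (String × Int))) (out : Int × (List (String × Int))) : Decidable (Spec_normalize_term_py term out) := by unfold Spec_normalize_term_py; infer_instance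

-- ===== CLAIM (what is proved, stated in full; the proofs are below) =====
def Claim_equal_normalize_term_py : Prop := ∀ (term : Int × (List (String × Int))), Dom_normalize_term_py term → Spec_normalize_term_py term (normalize_term_py term)

-- ===== LEMMAS AND PROOFS =====

theorem insertBy_cons {α : Type} (b : α → α → Bool) (x y : α) (ys : List α) :
    PySem.List.insertBy b x (y :: ys) =
      if b x y then x :: y :: ys else y :: PySem.List.insertBy b x ys := rfl

theorem insertBy_perm {α : Type} (b : α → α → Bool) (x : α) (ys : List α) :
    (PySem.List.insertBy b x ys).Perm (x :: ys) := by
  induction ys with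
  | nil => simp [PySem.List.insertBy]
  | cons y ys ih =>
    rw [insertBy_cons]
    split_ifs with h
    · exact List.Perm.refl _
    · exact (ih.cons y).trans (List.Perm.swap x y ys)

theorem insertBy_congr {α : Type} (b1 b2 : α → α → Bool) (x : α) (ys : List α)
    (h : ∀ y ∈ ys, b1 x y = b2 x y) :
    PySem.List.insertBy b1 x ys = PySem.List.insertBy b2 x ys := by
  induction ys with
  | nil => rfl
  | cons y ys ih =>
    rw [insertBy_cons, insertBy_cons, h y (by simp),
      ih (fun z hz => h z (by simp [hz]))]

-- A sort with a lexicographic tuple key equals the sort by the first key alone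
-- when no two elements share a first key.
theorem sorted2_eq_sorted_of_nodup {α κ₁ κ₂ : Type} [LinearOrder κ₁] [LT κ₂] [DecidableLT κ₂]
    (xs : List α) (k1 : α → κ₁) (k2 : α → κ₂) (h : (xs.map k1).Nodup) :
    PySem.List.sorted2 xs k1 k2 = PySem.List.sorted xs k1 := by
  show xs.foldl (fun acc x => PySem.List.insertBy
      (fun a b => decide (k1 a < k1 b) || !decide (k1 b < k1 a) && decide (k2 a < k2 b)) x acc) []
    = xs.foldl (fun acc x => PySem.List.insertBy (fun a b => decide (k1 a < k1 b)) x acc) []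
  have main : ∀ (l : List α) (acc : List α),
      ((l.map k1) ++ (acc.map k1)).Nodup →
      l.foldl (fun acc x => PySem.List.insertBy
        (fun a b => decide (k1 a < k1 b) || !decide (k1 b < k1 a) && decide (k2 a < k2 b)) x acc) acc
      = l.foldl (fun acc x => PySem.List.insertBy (fun a b => decide (k1 a < k1 b)) x acc) acc := by
    intro l
    induction l with
    | nil => intro acc _; rfl
    | cons x l ih =>
      intro acc hnd
      have hx : ∀ y ∈ acc, k1 x ≠ k1 y := by
        intro y hy hEq
        have : k1 x ∈ acc.map k1 := hEq ▸ List.mem_map_of_mem hy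
        have hnd' := hnd
        simp only [List.map_cons, List.cons_append, List.nodup_cons] at hnd'
        exact hnd'.1 (by simp [this])
      have hstep : PySem.List.insertBy
          (fun a b => decide (k1 a < k1 b) || !decide (k1 b < k1 a) && decide (k2 a < k2 b)) x acc
          = PySem.List.insertBy (fun a b => decide (k1 a < k1 b)) x acc := by
        apply insertBy_congr
        intro y hy
        have hne := hx y hy
        rcases lt_trichotomy (k1 x) (k1 y) with hlt | heq | hgt
        · simp [hlt, not_lt_of_gt hlt]
        · exact absurd heq hne
        · simp [hgt, not_lt_of_gt hgt]
      simp only [List.foldl_cons, hstep]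
      apply ih
      have hperm : ((x :: l).map k1 ++ acc.map k1).Perm
          (l.map k1 ++ (PySem.List.insertBy (fun a b => decide (k1 a < k1 b)) x acc).map k1) := by
        have h1 : ((x :: acc).map k1).Perm
            ((PySem.List.insertBy (fun a b => decide (k1 a < k1 b)) x acc).map k1) :=
          ((insertBy_perm _ x acc).map k1).symm
        have h2 : (k1 x :: (l.map k1 ++ acc.map k1)).Perm
            (l.map k1 ++ (PySem.List.insertBy (fun a b => decide (k1 a < k1 b)) x acc).map k1) :=
          List.Perm.trans List.perm_middle.symm (List.Perm.append_left _ (by simpa using h1))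
        simpa using h2
      exact hperm.nodup hnd
  exact main xs [] (by simpa using h)

-- value of a key after the Counter-building loop of port A
theorem getD_foldl_modify_add (l : List (String × Int)) (d : PySem.Dict String Int) (k : String) :
    (l.foldl (fun d p => d.modify p.1 0 (· + p.2)) d).getD k 0
      = d.getD k 0 + ((l.filter (fun p => p.1 == k)).map (fun p => p.2)).sum := by
  induction l generalizing d with
  | nil => simp
  | cons p l ih =>
    simp only [List.foldl_cons, ih, List.filter_cons]
    by_cases hk : p.1 = k
    · simp [hk]
      ring
    · have hbe : (p.1 == k) = false := by simp [hk]
      simp [hbe, PySem.Dict.getD_modify, Ne.symm hk]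

-- the second components of the two results agree (the heart of the equivalence)
theorem normalize_core (xs : List (String × Int)) :
    PySem.List.sorted2
      (((xs.foldl (fun d p => d.modify p.1 0 (· + p.2)) PySem.Dict.empty).items).filter
        (fun p => decide (p.2 ≠ 0))) (fun p => p.1) (fun p => p.2)
    = (PySem.List.sorted (PySem.Set.ofList (xs.map (fun p => p.1))) (fun s => s)).foldl
        (fun acc s =>
          let total := ((xs.filter (fun p => p.1 == s)).map (fun p => p.2)).sum
          if total ≠ 0 then acc ++ [(s, total)] else acc) [] := by
  set T : String → Int := fun s => ((xs.filter (fun p => p.1 == s)).map (fun p => p.2)).sum with hT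
  set K : List String := PySem.Set.ofList (xs.map (fun p => p.1)) with hK
  set d : PySem.Dict String Int :=
    xs.foldl (fun d p => d.modify p.1 0 (· + p.2)) PySem.Dict.empty with hd
  have hkeys : d.keys = K := by
    have h1 : d.keys = PySem.Set.update PySem.Dict.empty.keys (xs.map (fun p => p.1)) :=
      PySem.Dict.keys_foldl_modify_key xs (fun p => p.1) 0 (fun _ p => (· + p.2)) PySem.Dict.empty
    rw [h1, hK]
    rfl
  have hnodup : d.keys.Nodup :=
    PySem.Dict.nodup_keys_foldl_modify_key xs (fun p => p.1) 0 (fun _ p => (· + p.2))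
      PySem.Dict.empty (by simp)
  have hget : ∀ k, d.getD k 0 = T k := by
    intro k
    have := getD_foldl_modify_add xs PySem.Dict.empty k
    simpa [hT] using this
  have hitems : d.items = K.map (fun k => (k, T k)) := by
    rw [PySem.Dict.items_eq_map_keys d hnodup 0, hkeys]
    exact List.map_congr_left (fun k _ => by rw [hget])
  rw [hitems, List.filter_map]
  have hcomp : ((fun p : String × Int => decide (p.2 ≠ 0)) ∘ (fun k => (k, T k)))
      = fun s => decide (T s ≠ 0) := rfl
  rw [hcomp]
  have hKnodup : K.Nodup := hK ▸ PySem.Set.nodup_ofList _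
  have hstep1 : PySem.List.sorted2 ((K.filter (fun s => decide (T s ≠ 0))).map (fun k => (k, T k)))
      (fun p => p.1) (fun p => p.2)
      = PySem.List.sorted ((K.filter (fun s => decide (T s ≠ 0))).map (fun k => (k, T k)))
          (fun p => p.1) := by
    apply sorted2_eq_sorted_of_nodup
    rw [List.map_map]
    have hcid : ((fun p : String × Int => p.1) ∘ fun k => (k, T k)) = id := rfl
    rw [hcid, List.map_id]
    exact hKnodup.filter _
  rw [hstep1]
  have hsortedK : List.Pairwise (· < ·) (PySem.List.sorted K (fun s => s)) := by
    rw [hK]; exact PySem.List.sorted_ofList_pairwise_lt _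
  have hstep2 : PySem.List.sorted ((K.filter (fun s => decide (T s ≠ 0))).map (fun k => (k, T k)))
      (fun p => p.1)
      = ((PySem.List.sorted K (fun s => s)).filter (fun s => decide (T s ≠ 0))).map
          (fun k => (k, T k)) := by
    apply PySem.List.sorted_eq_of_perm_of_pairwise_lt
    · exact ((PySem.List.sorted_perm K (fun s => s) false).filter _).map _
    · rw [List.pairwise_map]
      exact (hsortedK.filter _).imp (fun h => h)
  rw [hstep2]
  have hfun : (fun (acc : List (String × Int)) (s : String) =>
        let total := T s
        if total ≠ 0 then acc ++ [(s, total)] else acc)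
      = fun acc s => if (fun s => decide (T s ≠ 0)) s = true
          then acc ++ [(fun k => (k, T k)) s] else acc := by
    funext acc s
    by_cases h : T s ≠ 0 <;> simp [h]
  show _ = (PySem.List.sorted K (fun s => s)).foldl
      (fun acc s =>
        let total := T s
        if total ≠ 0 then acc ++ [(s, total)] else acc) []
  rw [hfun, PySem.List.foldl_append_if]
  simp

-- ===== VERDICT (by name: the statement is the Claim_ definition above) =====
theorem normalize_term_py_spec : Claim_equal_normalize_term_py := by
  intro term _
  show normalize_term_py term = normalize_term_py_alt term
  exact congrArg (Prod.mk term.1) (normalize_core term.2)
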